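-- pv_equiv track=rewrite | github.com/yachielab/Interstellar | py/func/barcodeConverter.py | sortCounter
-- ===== SOURCE A (Python) =====
-- def sortCounter(counterDict):
--     dict_tmp={}
--     local_count_sort=sorted(counterDict.items(),key=lambda x:x[1],reverse=True)
--     local_k_sorted=[c[0] for c in local_count_sort]
--     if "-1" in local_k_sorted:
--         del local_k_sorted[local_k_sorted.index("-1")]
--         dict_tmp["-1"]=-1
--     for idx,k in enumerate(local_k_sorted):
--         dict_tmp[k]=idx
--     return dict_tmp
-- ===== SOURCE B (Python) =====
-- def sortCounter(counterDict):
--     # counting-sort-style: walk the distinct counts from largest to smallest and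
--     # rank the keys of each count block in dict order; no stable item sort, no
--     # intermediate key list, no .index/del.
--     out = {"-1": -1} if "-1" in counterDict else {}
--     rank = 0
--     for c in sorted({v for k, v in counterDict.items() if k != "-1"}, reverse=True):
--         for k, v in counterDict.items():
--             if v == c and k != "-1":
--                 out[k] = rank
--                 rank += 1
--     return out
-- ===== Notes on version B (the rewrite author's own statement) =====
-- stated objective: alternative
-- what changed: Replaces A's stable descending sort of all items plus key-list comprehension, .index/del removal and enumerate pass by a counting-sort-style scheme: sort only the set of distinct counts descending and, for each count, scan the dict once ranking its keys in dict order, skipping '-1' (pre-inserted).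
import Mathlib
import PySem

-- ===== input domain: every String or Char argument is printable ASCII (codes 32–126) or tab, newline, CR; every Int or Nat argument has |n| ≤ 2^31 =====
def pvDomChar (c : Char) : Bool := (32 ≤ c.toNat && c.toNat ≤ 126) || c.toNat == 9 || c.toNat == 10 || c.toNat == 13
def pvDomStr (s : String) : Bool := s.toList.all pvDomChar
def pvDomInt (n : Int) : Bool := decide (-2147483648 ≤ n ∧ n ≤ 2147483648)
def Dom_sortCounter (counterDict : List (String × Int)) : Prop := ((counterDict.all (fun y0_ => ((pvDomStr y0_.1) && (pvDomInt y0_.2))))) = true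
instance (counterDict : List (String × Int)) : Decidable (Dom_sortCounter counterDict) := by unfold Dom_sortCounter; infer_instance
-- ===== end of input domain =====

-- B replaces A's stable descending sort of the items + key-list + .index/del + enumerate pass
-- by a counting-sort-style scheme: sort only the distinct counts and, for each count from the
-- largest down, rank its keys in dict order (objective: alternative); return-value equivalence.

-- ===== PORT A =====
def sortCounter (counterDict : List (String × Int)) : List (String × Int) :=
  let dict_tmp : PySem.Dict String Int := PySem.Dict.empty
  let local_count_sort := PySem.List.sorted (PySem.Dict.ofList counterDict).items (fun x => x.2) true
  let local_k_sorted := local_count_sort.map (fun c => c.1)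
  let st :=
    if "-1" ∈ local_k_sorted then
      ((PySem.List.remove? local_k_sorted "-1").getD local_k_sorted, dict_tmp.insert "-1" (-1))
    else (local_k_sorted, dict_tmp)
  ((PySem.List.enumerate st.1 0).foldl (fun (d : PySem.Dict String Int) p => d.insert p.2 p.1) st.2).items

-- ===== PORT B =====
def sortCounter_alt (counterDict : List (String × Int)) : List (String × Int) :=
  let d := PySem.Dict.ofList counterDict
  let out0 : PySem.Dict String Int :=
    if d.contains "-1" then PySem.Dict.empty.insert "-1" (-1) else PySem.Dict.empty
  let cs := PySem.List.sorted
      (PySem.Set.ofList ((d.items.filter (fun p => p.1 != "-1")).map (fun p => p.2)))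
      (fun x => x) true
  ((cs.foldl
      (fun (st : PySem.Dict String Int × Int) c =>
        d.items.foldl
          (fun (st : PySem.Dict String Int × Int) p =>
            if p.2 == c && p.1 != "-1" then (st.1.insert p.1 st.2, st.2 + 1) else st)
          st)
      (out0, 0)).1).items

-- ===== PRECONDITION & SPEC =====
def Spec_sortCounter (counterDict : List (String × Int)) (out : List (String × Int)) : Prop := out = sortCounter_alt counterDict
instance (counterDict : List (String × Int)) (out : List (String × Int)) : Decidable (Spec_sortCounter counterDict out) := by unfold Spec_sortCounter; infer_instance

-- ===== CLAIM (what is proved, stated in full; the proofs are below) =====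
def Claim_equal_sortCounter : Prop := ∀ (counterDict : List (String × Int)), Dom_sortCounter counterDict → Spec_sortCounter counterDict (sortCounter counterDict)

-- ===== LEMMAS AND PROOFS =====

-- inserting into a descending list commutes with filtering (when the element is kept)
theorem pvInsertBy_filter {α : Type} (k : α → Int) (P : α → Bool) (x : α) (ys : List α)
    (hys : ys.Pairwise (fun a b => k b ≤ k a)) :
    (PySem.List.insertBy (fun a b => decide (k b < k a)) x ys).filter P
      = if P x then PySem.List.insertBy (fun a b => decide (k b < k a)) x (ys.filter P)
        else ys.filter P := by
  induction ys with
  | nil =>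
    by_cases hPx : P x <;>
      simp [PySem.List.insertBy, hPx]
  | cons y ys ih =>
    have hpw := (List.pairwise_cons.mp hys).2
    have hyb := (List.pairwise_cons.mp hys).1
    by_cases hlt : k y < k x
    · rw [show PySem.List.insertBy (fun a b => decide (k b < k a)) x (y :: ys)
            = x :: y :: ys from by simp [PySem.List.insertBy, hlt]]
      by_cases hPx : P x
      · rw [if_pos hPx, List.filter_cons, if_pos hPx]
        have hall : ∀ z ∈ (y :: ys).filter P, k z < k x := by
          intro z hz
          have hz' := List.mem_of_mem_filter hz
          rcases hz' with _ | hz'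
          · exact hlt
          · exact lt_of_le_of_lt (hyb z (by assumption)) hlt
        cases hfil : (y :: ys).filter P with
        | nil => simp [PySem.List.insertBy]
        | cons z t =>
          have hzx : k z < k x := hall z (hfil ▸ List.mem_cons_self)
          simp [PySem.List.insertBy, hzx]
      · rw [if_neg hPx, List.filter_cons, if_neg hPx]
    · rw [show PySem.List.insertBy (fun a b => decide (k b < k a)) x (y :: ys)
            = y :: PySem.List.insertBy (fun a b => decide (k b < k a)) x ys from by
          simp [PySem.List.insertBy, hlt]]
      rw [List.filter_cons, List.filter_cons]
      by_cases hPy : P y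
      · rw [if_pos hPy, if_pos hPy, ih hpw]
        by_cases hPx : P x
        · rw [if_pos hPx, if_pos hPx,
            show PySem.List.insertBy (fun a b => decide (k b < k a)) x (y :: ys.filter P)
              = y :: PySem.List.insertBy (fun a b => decide (k b < k a)) x (ys.filter P) from by
            simp [PySem.List.insertBy, hlt]]
        · rw [if_neg hPx, if_neg hPx]
      · rw [if_neg hPy, if_neg hPy]
        exact ih hpw

-- sorting a list with one more element at the end inserts that element
theorem pvSorted_snoc {α : Type} (k : α → Int) (l : List α) (x : α) :
    PySem.List.sorted (l ++ [x]) k true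
      = PySem.List.insertBy (fun a b => decide (k b < k a)) x (PySem.List.sorted l k true) := by
  rw [PySem.List.sorted_rev_eq_foldl_insertBy, PySem.List.sorted_rev_eq_foldl_insertBy,
    List.foldl_append, List.foldl_cons, List.foldl_nil]

-- STABILITY: sorting then filtering = filtering then sorting
theorem pvSorted_filter {α : Type} (k : α → Int) (P : α → Bool) (l : List α) :
    (PySem.List.sorted l k true).filter P = PySem.List.sorted (l.filter P) k true := by
  induction l using List.reverseRecOn with
  | nil => simp [PySem.List.sorted_rev_eq_foldl_insertBy]
  | append_singleton l x ih =>
    rw [pvSorted_snoc, pvInsertBy_filter k P x _ (PySem.List.sorted_pairwise_rev l k),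
      List.filter_append, ih]
    by_cases hPx : P x
    · rw [if_pos hPx, show List.filter P [x] = [x] from by simp [hPx], pvSorted_snoc]
    · rw [if_neg hPx, show List.filter P [x] = [] from by simp [hPx], List.append_nil]

-- in a descending list bounded by v, the elements with key v form the prefix
theorem pvFilter_max_split {α : Type} (k : α → Int) (v : Int) (s : List α)
    (hs : s.Pairwise (fun a b => k b ≤ k a)) (hb : ∀ y ∈ s, k y ≤ v) :
    s.filter (fun y => k y == v) ++ s.filter (fun y => k y != v) = s := by
  induction s with
  | nil => simp
  | cons y t ih =>
    have hpw := (List.pairwise_cons.mp hs).2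
    have hyb := (List.pairwise_cons.mp hs).1
    by_cases hy : k y = v
    · rw [List.filter_cons, List.filter_cons, if_pos (by simpa using hy),
        if_neg (by simpa using hy), List.cons_append,
        ih hpw (fun z hz => hb z (List.mem_cons_of_mem y hz))]
    · have h1 : List.filter (fun y => k y == v) (y :: t) = [] := by
        rw [List.filter_eq_nil_iff]
        intro z hz
        rcases List.mem_cons.mp hz with rfl | hz'
        · simpa using hy
        · have h3 : k z ≤ k y := hyb z hz'
          have h4 := hb y List.mem_cons_self
          have : k z ≠ v := by omega
          simpa using this
      have h2 : List.filter (fun y => k y != v) (y :: t) = y :: t := by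
        rw [List.filter_eq_self]
        intro z hz
        rcases List.mem_cons.mp hz with rfl | hz'
        · simpa using hy
        · have h3 : k z ≤ k y := hyb z hz'
          have h4 := hb y List.mem_cons_self
          have : k z ≠ v := by omega
          simpa using this
      rw [h1, h2, List.nil_append]

-- MAIN: the stable descending sort is the concatenation, over the distinct counts in
-- descending order, of the equal-count blocks in original order
theorem pvSorted_blocks_aux (n : Nat) : ∀ l : List (String × Int), l.length ≤ n →
    PySem.List.sorted l (fun x => x.2) true
      = (PySem.List.sorted (PySem.Set.ofList (l.map (fun x => x.2))) (fun x => x) true).flatMap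
          (fun c => l.filter (fun x => x.2 == c)) := by
  induction n with
  | zero =>
    intro l hl
    rw [List.length_eq_zero_iff.mp (Nat.le_zero.mp hl)]
    rfl
  | succ n ih =>
    intro l hl
    cases hln : l with
    | nil => rfl
    | cons h0 t0 =>
      rw [← hln]
      -- the sorted distinct values are nonempty
      have hSne : PySem.List.sorted (PySem.Set.ofList (l.map (fun x => x.2))) (fun x => x) true ≠ [] := by
        intro hc
        have := (PySem.List.sorted_eq_nil_iff _ _ _).mp hc
        have hm : h0.2 ∈ (PySem.Set.ofList (l.map (fun x => x.2)) : List Int) := by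
          rw [PySem.Set.mem_ofList]
          exact List.mem_map_of_mem (by rw [hln]; exact List.mem_cons_self)
        rw [this] at hm
        cases hm
      cases hvs : PySem.List.sorted (PySem.Set.ofList (l.map (fun x => x.2))) (fun x => x) true with
      | nil => exact absurd hvs hSne
      | cons v vs' =>
        have hvsnodup : (v :: vs').Nodup := by
          rw [← hvs]
          exact ((PySem.List.sorted_perm _ _ _).nodup_iff).mpr (PySem.Set.nodup_ofList _)
        have hvsmem : ∀ c, c ∈ v :: vs' ↔ c ∈ l.map (fun x => x.2) := by
          intro c
          rw [← hvs, PySem.List.mem_sorted, PySem.Set.mem_ofList]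
        have hvmax : ∀ y ∈ l, y.2 ≤ v := by
          intro y hy
          exact PySem.List.key_head_sorted_rev_ge _ _ hvs y.2
            ((PySem.Set.mem_ofList _ _).mpr (List.mem_map_of_mem hy))
        have hvmem : ∃ y ∈ l, y.2 = v := by
          have := (hvsmem v).mp List.mem_cons_self
          simpa using this
        -- split the sorted list at the maximal value
        have hsplit : PySem.List.sorted l (fun x => x.2) true
            = l.filter (fun x => x.2 == v)
              ++ PySem.List.sorted (l.filter (fun x => x.2 != v)) (fun x => x.2) true := by
          have h1 := pvFilter_max_split (fun x : String × Int => x.2) v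
            (PySem.List.sorted l (fun x => x.2) true)
            (PySem.List.sorted_pairwise_rev l (fun x => x.2))
            (fun y hy => hvmax y ((PySem.List.mem_sorted _ _ _ _).mp hy))
          rw [pvSorted_filter, pvSorted_filter] at h1
          have h2 : PySem.List.sorted (l.filter (fun x => x.2 == v)) (fun x => x.2) true
              = l.filter (fun x => x.2 == v) := by
            apply PySem.List.sorted_rev_eq_self_of_pairwise
            apply List.pairwise_of_forall_mem_list
            intro a ha b hb
            have ha' : a.2 = v := by simpa using (List.mem_filter.mp ha).2
            have hb' : b.2 = v := by simpa using (List.mem_filter.mp hb).2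
            omega
          rw [h2] at h1
          exact h1.symm
        -- the filtered list is shorter
        have hshort : (l.filter (fun x => x.2 != v)).length < l.length := by
          obtain ⟨y, hy, hyv⟩ := hvmem
          have : ¬ ((fun x : String × Int => x.2 != v) y = true) := by simpa using hyv
          exact List.length_filter_lt_length_iff_exists.mpr ⟨y, hy, this⟩
        -- the tail of the distinct values is the sorted distinct values of the filtered list
        have htail : PySem.List.sorted
            (PySem.Set.ofList ((l.filter (fun x => x.2 != v)).map (fun x => x.2))) (fun x => x) true
            = vs' := by
          apply PySem.List.sorted_rev_eq_of_perm_of_pairwise_gt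
          · apply (List.perm_ext_iff_of_nodup (List.Nodup.of_cons hvsnodup) (PySem.Set.nodup_ofList _)).mpr
            intro c
            rw [PySem.Set.mem_ofList]
            constructor
            · intro hc
              have hcv : c ≠ v := by
                intro hcv
                exact (List.nodup_cons.mp hvsnodup).1 (hcv ▸ hc)
              have : c ∈ l.map (fun x => x.2) := (hvsmem c).mp (List.mem_cons_of_mem v hc)
              obtain ⟨y, hy, hyc⟩ := List.mem_map.mp this
              exact List.mem_map.mpr ⟨y, List.mem_filter.mpr ⟨hy, by simp [hyc, hcv]⟩, hyc⟩
            · intro hc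
              obtain ⟨y, hy, hyc⟩ := List.mem_map.mp hc
              have hy' := List.mem_filter.mp hy
              have hcv : c ≠ v := by
                intro hcc
                have h5 := hy'.2
                rw [hyc, hcc] at h5
                simp at h5
              have : c ∈ v :: vs' := (hvsmem c).mpr (List.mem_map.mpr ⟨y, hy'.1, hyc⟩)
              cases List.mem_cons.mp this with
              | inl h => exact absurd h hcv
              | inr h => exact h
          · -- vs' is strictly descending
            have hge : (v :: vs').Pairwise (fun a b : Int => b ≤ a) := by
              rw [← hvs]
              exact PySem.List.sorted_pairwise_rev _ _
            have hgt : (v :: vs').Pairwise (fun a b : Int => b < a) := by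
              have hne : (v :: vs').Pairwise (fun a b : Int => a ≠ b) := hvsnodup
              exact (hge.and hne).imp (fun {a b} h => lt_of_le_of_ne h.1 (Ne.symm h.2))
            exact (List.pairwise_cons.mp hgt).2
        -- buckets over the filtered list agree with buckets over l, for values in vs'
        have hbuck : ∀ c ∈ vs', (l.filter (fun x => x.2 != v)).filter (fun x => x.2 == c)
            = l.filter (fun x => x.2 == c) := by
          intro c hc
          have hcv : c ≠ v := fun h => (List.nodup_cons.mp hvsnodup).1 (h ▸ hc)
          rw [List.filter_filter]
          apply List.filter_congr
          intro x hx
          by_cases hxc : x.2 = c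
          · simp [hxc, hcv]
          · simp [hxc]
        have ihl := ih (l.filter (fun x => x.2 != v)) (by omega)
        rw [htail] at ihl
        rw [List.flatMap_cons, hsplit, ihl]
        congr 1
        exact List.flatMap_congr hbuck

theorem pvSorted_eq_flatMap_blocks (l : List (String × Int)) :
    PySem.List.sorted l (fun x => x.2) true
      = (PySem.List.sorted (PySem.Set.ofList (l.map (fun x => x.2))) (fun x => x) true).flatMap
          (fun c => l.filter (fun x => x.2 == c)) :=
  pvSorted_blocks_aux l.length l le_rfl

-- the rank-counter fold over a key list builds the same dict as the enumerate fold
theorem pvCounterFold_eq_enumerate (ks : List String) (d : PySem.Dict String Int) (n : Int) :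
    (ks.foldl (fun (st : PySem.Dict String Int × Int) kk => (st.1.insert kk st.2, st.2 + 1)) (d, n)).1
      = (PySem.List.enumerate ks n).foldl (fun (d : PySem.Dict String Int) p => d.insert p.2 p.1) d := by
  induction ks generalizing d n with
  | nil => simp [PySem.List.enumerate]
  | cons k ks ih =>
    rw [List.foldl_cons, PySem.List.enumerate_cons, List.foldl_cons]
    exact ih _ _

-- B's nested loop = the rank-counter fold over the concatenated blocks' keys
theorem pvB_fold (cs : List Int) (l : List (String × Int)) (st : PySem.Dict String Int × Int) :
    cs.foldl
      (fun (st : PySem.Dict String Int × Int) c =>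
        l.foldl
          (fun (st : PySem.Dict String Int × Int) p =>
            if p.2 == c && p.1 != "-1" then (st.1.insert p.1 st.2, st.2 + 1) else st)
          st)
      st
    = (cs.flatMap (fun c => (l.filter (fun p => p.2 == c && p.1 != "-1")).map (fun p => p.1))).foldl
        (fun (st : PySem.Dict String Int × Int) kk => (st.1.insert kk st.2, st.2 + 1)) st := by
  rw [List.foldl_flatMap]
  congr 1
  funext st c
  rw [List.foldl_map, List.foldl_filter]

-- on a Nodup list, Python's del lst[lst.index(v)] leaves exactly the filtered list
theorem pvRemove_eq_filter (xs : List String) (v : String) (hnd : xs.Nodup) (hm : v ∈ xs) :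
    (PySem.List.remove? xs v).getD xs = xs.filter (fun x => x != v) := by
  induction xs with
  | nil => cases hm
  | cons x xs ih =>
    by_cases hx : v = x
    · subst hx
      have hv : v ∉ xs := (List.nodup_cons.mp hnd).1
      simp [PySem.List.remove?, List.idxOf?_cons]
      exact (List.filter_eq_self.mpr (fun a ha => by
        simp; exact fun h => hv (h ▸ ha))).symm
    · have hm' : v ∈ xs := by cases hm with
        | head => exact absurd rfl hx
        | tail _ h => exact h
      have hs : (List.idxOf? v xs).isSome := List.isSome_idxOf?.mpr hm'
      obtain ⟨k, hk⟩ := Option.isSome_iff_exists.mp hs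
      have ihe := ih (List.nodup_cons.mp hnd).2 hm'
      simp [PySem.List.remove?, List.idxOf?_cons, beq_eq_false_iff_ne.mpr (fun h => hx h.symm), hk,
        List.eraseIdx_cons_succ, Ne.symm hx]
      simpa [PySem.List.remove?, hk] using ihe

-- the key lists the two programs rank coincide
theorem pvKeys_eq (l : List (String × Int)) :
    (PySem.List.sorted (PySem.Set.ofList ((l.filter (fun p => p.1 != "-1")).map (fun p => p.2)))
        (fun x => x) true).flatMap
      (fun c => (l.filter (fun p => p.2 == c && p.1 != "-1")).map (fun p => p.1))
    = ((PySem.List.sorted l (fun x => x.2) true).map (fun c => c.1)).filter (fun x => x != "-1") := by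
  have h1 : (fun c : Int => (l.filter (fun p => p.2 == c && p.1 != "-1")).map (fun p => p.1))
      = fun c : Int => (((l.filter (fun p => p.1 != "-1")).filter (fun p => p.2 == c)).map (fun p => p.1)) := by
    funext c
    rw [List.filter_filter]
  rw [h1, ← List.map_flatMap, ← pvSorted_eq_flatMap_blocks, ← pvSorted_filter]
  simp [List.filter_map, Function.comp_def]

theorem sortCounter_eq_alt (counterDict : List (String × Int)) :
    sortCounter counterDict = sortCounter_alt counterDict := by
  unfold sortCounter sortCounter_alt
  dsimp only
  set d := PySem.Dict.ofList counterDict with hd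
  set l := d.items with hlitems
  set s := PySem.List.sorted l (fun x => x.2) true with hsrt
  set keys := s.map (fun c => c.1) with hkeys
  rw [pvB_fold, pvKeys_eq, pvCounterFold_eq_enumerate]
  have hperm : keys.Perm d.keys := by
    simpa [PySem.Dict.keys] using (PySem.List.sorted_perm l (fun x => x.2) true).map Prod.fst
  have hnd : keys.Nodup := hperm.nodup_iff.mpr (PySem.Dict.nodup_keys_ofList counterDict)
  have hmemiff : ("-1" ∈ keys) ↔ d.contains "-1" = true := by
    rw [PySem.Dict.contains_iff_mem_keys]
    exact hperm.mem_iff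
  by_cases hmem : "-1" ∈ keys
  · rw [if_pos hmem, if_pos (hmemiff.mp hmem)]
    rw [pvRemove_eq_filter keys "-1" hnd hmem]
  · rw [if_neg hmem]
    have hc : d.contains "-1" = false := by
      rcases Bool.eq_false_or_eq_true (d.contains "-1") with h | h
      · exact absurd (hmemiff.mpr h) hmem
      · exact h
    rw [hc]
    simp only [Bool.false_eq_true, if_false]
    rw [List.filter_eq_self.mpr (fun a ha => by
      simp; exact fun h => hmem (h ▸ ha))]

-- ===== VERDICT (by name: the statement is the Claim_ definition above) =====
theorem sortCounter_spec : Claim_equal_sortCounter := by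
  intro counterDict _
  unfold Spec_sortCounter
  exact sortCounter_eq_alt counterDict
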